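-- pv_equiv track=rewrite | github.com/MrBrantCode/unitest_baseline | mut_generate/mist_train_taco/taco_15797/solution.py | max_strength_groups
-- ===== SOURCE A (Python) =====
-- def max_strength_groups(n, heights):
--     pse = [-1] * n
--     nse = [n] * n
--     stack = [0]
--     stack2 = [n - 1]
--
--     for i in range(1, n):
--         while stack and heights[i] < heights[stack[-1]]:
--             nse[stack.pop()] = i
--         stack.append(i)
--
--     for i in range(1, n):
--         while stack2 and heights[n - i - 1] < heights[stack2[-1]]:
--             pse[stack2.pop()] = n - i - 1
--         stack2.append(n - i - 1)
--
--     dic = {}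
--     for i in range(n):
--         dic[heights[i]] = max(dic.get(heights[i], 0), nse[i] - pse[i] - 1)
--
--     k = list(dic.items())
--     k.sort(reverse=True, key=lambda x: x[0])
--
--     result = [0] * n
--     cnt = 0
--     for ind, (item, times) in enumerate(k):
--         times -= cnt
--         for _ in range(times):
--             cnt += 1
--             result[cnt - 1] = item
--
--     return result
-- ===== SOURCE B (Python) =====
-- def max_strength_groups(n, heights):
--     if n <= 0:
--         return []
--     h = heights[:n]
--     m = len(h)
--     if m == 0:
--         return []
--     # result[k-1] will hold the best minimum over all groups of size k.
--     result = [min(h)] * m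
--     for i in range(m):
--         # widest window in which h[i] is a minimum (nearest strictly smaller on each side)
--         left = i - 1
--         while left >= 0 and h[left] >= h[i]:
--             left -= 1
--         right = i + 1
--         while right < m and h[right] >= h[i]:
--             right += 1
--         w = right - left - 1
--         if h[i] > result[w - 1]:
--             result[w - 1] = h[i]
--     # a group of size k can always be shrunk: propagate maxima backwards
--     for k in range(m - 2, -1, -1):
--         if result[k + 1] > result[k]:
--             result[k] = result[k + 1]
--     return result
-- ===== Notes on version B (the rewrite author's own statement) =====
-- stated objective: simpler
-- what changed: Replaces A's two monotonic-stack passes, value-keyed dict and sort-then-fill by direct nearest-smaller scans per element plus an answer array indexed by window size with backward max propagation.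
import Mathlib
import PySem

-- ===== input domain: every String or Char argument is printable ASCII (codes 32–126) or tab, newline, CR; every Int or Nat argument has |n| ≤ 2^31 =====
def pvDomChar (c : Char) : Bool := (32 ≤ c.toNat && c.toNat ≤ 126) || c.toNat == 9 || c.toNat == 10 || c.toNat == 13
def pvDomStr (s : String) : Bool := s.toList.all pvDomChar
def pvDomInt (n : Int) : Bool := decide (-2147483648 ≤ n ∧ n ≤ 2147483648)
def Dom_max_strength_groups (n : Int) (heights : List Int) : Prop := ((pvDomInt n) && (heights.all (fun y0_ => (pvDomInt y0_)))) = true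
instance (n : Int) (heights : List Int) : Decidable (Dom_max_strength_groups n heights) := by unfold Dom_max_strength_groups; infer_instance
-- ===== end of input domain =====

-- B replaces A's monotonic stacks + dict + sort-then-fill by per-element nearest-smaller
-- scans and an answer array indexed by window size with backward max propagation (simpler).

-- ===== PORT A =====
-- Python stacks are held top-first: stack[-1] is the head, append is cons, pop is tail.
-- Shared body of A's two identical while-loops: while stack and heights[x] < heights[stack[-1]]: arr[stack.pop()] = x
def msgPop (heights : List Int) (x : Int) : List Int → List Int → List Int × List Int
  | arr, [] => (arr, [])
  | arr, j :: rest =>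
    if PySem.List.pyGetD heights x 0 < PySem.List.pyGetD heights j 0 then
      msgPop heights x (PySem.List.pySetD arr j x) rest
    else (arr, j :: rest)

-- inner fill loop: for _ in range(times): cnt += 1; result[cnt-1] = item
def msgFill (item : Int) : Nat → List Int × Int → List Int × Int
  | 0, s => s
  | t + 1, (result, cnt) => msgFill item t (PySem.List.pySetD result (cnt + 1 - 1) item, cnt + 1)

def max_strength_groups (n : Int) (heights : List Int) : List Int :=
  let pse0 := PySem.List.pyRepeat [(-1 : Int)] n
  let nse0 := PySem.List.pyRepeat [n] n
  let s1 := (PySem.List.pyRange 1 n 1).foldl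
    (fun (s : List Int × List Int) i =>
      let t := msgPop heights i s.1 s.2
      (t.1, i :: t.2)) (nse0, [0])
  let nse := s1.1
  let s2 := (PySem.List.pyRange 1 n 1).foldl
    (fun (s : List Int × List Int) i =>
      let t := msgPop heights (n - i - 1) s.1 s.2
      (t.1, (n - i - 1) :: t.2)) (pse0, [n - 1])
  let pse := s2.1
  let dic := (PySem.List.pyRange 0 n 1).foldl
    (fun (d : PySem.Dict Int Int) i =>
      d.insert (PySem.List.pyGetD heights i 0)
        (max (d.getD (PySem.List.pyGetD heights i 0) 0)
             (PySem.List.pyGetD nse i 0 - PySem.List.pyGetD pse i 0 - 1))) PySem.Dict.empty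
  let k := PySem.List.sorted dic.items (fun x => x.1) true
  let rc := k.foldl (fun (s : List Int × Int) p => msgFill p.1 (p.2 - s.2).toNat s)
    (PySem.List.pyRepeat [(0 : Int)] n, 0)
  rc.1

-- ===== PORT B =====
-- while left >= 0 and h[left] >= x: left -= 1
-- (structural on left+1: the argument is left+1 as a Nat, 0 meaning left = -1)
def msgScanL (h : List Int) (x : Int) : Nat → Int
  | 0 => -1
  | l + 1 => if x ≤ h.getD l 0 then msgScanL h x l else l

-- while right < m and h[right] >= x: right += 1   (structural on the fuel m - right)
def msgScanR (h : List Int) (x : Int) : Nat → Nat → Nat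
  | 0, right => right
  | f + 1, right => if x ≤ h.getD right 0 then msgScanR h x f (right + 1) else right

def max_strength_groups_alt (n : Int) (heights : List Int) : List Int :=
  if n ≤ 0 then [] else
  let h := PySem.List.slice heights none (some n)     -- heights[:n]
  let m := h.length
  if m = 0 then [] else
  let mn := (PySem.List.min? h (fun y => y)).getD 0   -- min(h); h ≠ [], the default is never used
  let r1 := (List.range m).foldl (fun (r : List Int) i =>
      let x := h.getD i 0
      let left := msgScanL h x i                      -- left starts at i - 1
      let right := msgScanR h x (m - (i + 1)) (i + 1) -- right starts at i + 1
      let w := (right : Int) - left - 1               -- w ≥ 1, so the read index w-1 is ≥ 0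
      if r.getD (w - 1).toNat 0 < x then PySem.List.pySetD r (w - 1) x else r)
    (List.replicate m mn)
  ((List.range (m - 1)).reverse).foldl (fun (r : List Int) k =>
      if r.getD k 0 < r.getD (k + 1) 0 then PySem.List.pySetD r (k : Int) (r.getD (k + 1) 0) else r) r1

-- ===== PRECONDITION & SPEC =====
-- Pre_ excludes exactly n > len(heights), where A raises IndexError on an out-of-range read.
def Pre_max_strength_groups (n : Int) (heights : List Int) : Prop :=
  n ≤ heights.length
instance (n : Int) (heights : List Int) : Decidable (Pre_max_strength_groups n heights) := by
  unfold Pre_max_strength_groups; infer_instance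

def pvWitness_max_strength_groups : Int × List Int := (3, [2, 1, 2])

def Spec_max_strength_groups (n : Int) (heights : List Int) (out : List Int) : Prop :=
  out = max_strength_groups_alt n heights
instance (n : Int) (heights : List Int) (out : List Int) : Decidable (Spec_max_strength_groups n heights out) := by
  unfold Spec_max_strength_groups; infer_instance

-- ===== CLAIM (what is proved, stated in full; the proofs are below) =====
def Claim_equal_max_strength_groups : Prop := ∀ (n : Int) (heights : List Int), Dom_max_strength_groups n heights → Pre_max_strength_groups n heights → Spec_max_strength_groups n heights (max_strength_groups n heights)

-- ===== LEMMAS AND PROOFS =====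

/- Reference semantics shared by both proofs: over h (the processed prefix), with m = h.length,
   hv i = h[i]; nseF i = nearest strictly-smaller index to the right (m if none);
   pseF i = nearest strictly-smaller index to the left (-1 if none); spanF i the window width;
   ansF k = best minimum over all windows of size k. -/
def hv (h : List Int) (i : Nat) : Int := h.getD i 0

theorem nseF_ex (h : List Int) (i : Nat) : ∃ j, h.length ≤ j ∨ (i < j ∧ hv h j < hv h i) :=
  ⟨h.length, Or.inl le_rfl⟩

def nseF (h : List Int) (i : Nat) : Nat := Nat.find (nseF_ex h i)

theorem pseD_ex (h : List Int) (i : Nat) : ∃ d, i ≤ d ∨ hv h (i - 1 - d) < hv h i :=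
  ⟨i, Or.inl le_rfl⟩

def pseD (h : List Int) (i : Nat) : Nat := Nat.find (pseD_ex h i)

def pseF (h : List Int) (i : Nat) : Int := (i : Int) - 1 - (pseD h i : Int)

def spanF (h : List Int) (i : Nat) : Int := (nseF h i : Int) - pseF h i - 1



-- basic facts about nseF
theorem nseF_le (h : List Int) (i : Nat) : nseF h i ≤ h.length :=
  Nat.find_min' (nseF_ex h i) (Or.inl le_rfl)

theorem lt_nseF (h : List Int) (i : Nat) (hi : i < h.length) : i < nseF h i := by
  unfold nseF
  by_contra hc
  rcases Nat.find_spec (nseF_ex h i) with h1 | h2 <;> omega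

theorem nseF_between (h : List Int) (i t : Nat) (h1 : i < t) (h2 : t < nseF h i) :
    hv h i ≤ hv h t := by
  have hm := Nat.find_min (nseF_ex h i) (show t < Nat.find (nseF_ex h i) from h2)
  by_contra hc
  exact hm (Or.inr ⟨h1, by omega⟩)

theorem nseF_hit (h : List Int) (i : Nat) (hlt : nseF h i < h.length) :
    hv h (nseF h i) < hv h i := by
  rcases Nat.find_spec (nseF_ex h i) with h1 | h2
  · exact absurd h1 (by unfold nseF at hlt; omega)
  · exact h2.2

theorem nseF_eq (h : List Int) (i j : Nat) (hij : i < j) (hjm : j ≤ h.length)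
    (hhit : j = h.length ∨ hv h j < hv h i)
    (hbet : ∀ t, i < t → t < j → hv h i ≤ hv h t) : nseF h i = j := by
  have hle : nseF h i ≤ j := by
    rcases hhit with rfl | hs
    · exact nseF_le h i
    · exact Nat.find_min' (nseF_ex h i) (Or.inr ⟨hij, hs⟩)
  have hge : j ≤ nseF h i := by
    by_contra hc
    push Not at hc
    rcases Nat.find_spec (nseF_ex h i) with h1 | h2
    · unfold nseF at hc; omega
    · exact absurd (hbet _ h2.1 hc) (by omega)
  omega

-- basic facts about pseF
theorem pseD_le (h : List Int) (i : Nat) : pseD h i ≤ i :=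
  Nat.find_min' (pseD_ex h i) (Or.inl le_rfl)

theorem pseF_lb (h : List Int) (i : Nat) : -1 ≤ pseF h i := by
  have := pseD_le h i; unfold pseF; omega

theorem pseF_lt (h : List Int) (i : Nat) : pseF h i < i := by
  unfold pseF; omega

theorem pseF_hit (h : List Int) (i : Nat) (hge : 0 ≤ pseF h i) :
    hv h (pseF h i).toNat < hv h i := by
  have hle := pseD_le h i
  have hspec := Nat.find_spec (pseD_ex h i)
  rcases hspec with h1 | h2
  · exfalso; unfold pseF pseD at hge; omega
  · have : (pseF h i).toNat = i - 1 - pseD h i := by unfold pseF at hge ⊢; omega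
    rw [this]; exact h2

theorem pseF_between (h : List Int) (i t : Nat) (h1 : pseF h i < (t : Int)) (h2 : t < i) :
    hv h i ≤ hv h t := by
  have hle := pseD_le h i
  have hd : i - 1 - t < pseD h i := by unfold pseF at h1; omega
  have hm := Nat.find_min (pseD_ex h i) hd
  by_contra hc
  apply hm
  right
  have he : i - 1 - (i - 1 - t) = t := by omega
  rw [he]
  omega

theorem pseF_eq (h : List Int) (i : Nat) (p : Int) (hlb : -1 ≤ p) (hub : p < i)
    (hhit : p = -1 ∨ hv h p.toNat < hv h i)
    (hbet : ∀ t : Nat, p < t → t < i → hv h i ≤ hv h t) : pseF h i = p := by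
  have key : pseD h i = ((i : Int) - 1 - p).toNat := by
    have hle : pseD h i ≤ ((i : Int) - 1 - p).toNat := by
      apply Nat.find_min' (pseD_ex h i)
      rcases hhit with rfl | hs
      · left; omega
      · right
        have : i - 1 - ((i:Int) - 1 - p).toNat = p.toNat := by omega
        rw [this]; exact hs
    have hge : ((i : Int) - 1 - p).toNat ≤ pseD h i := by
      by_contra hc
      push Not at hc
      have hd := pseD_le h i
      rcases Nat.find_spec (pseD_ex h i) with h1 | h2
      · unfold pseD at hc; omega
      · have ht : (i - 1 - pseD h i : Nat) < i := by omega
        have ht2 : p < ((i - 1 - pseD h i : Nat) : Int) := by omega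
        have := hbet _ ht2 ht
        unfold pseD at this
        omega
    omega
  unfold pseF
  rw [key]
  omega

theorem spanF_pos (h : List Int) (i : Nat) (hi : i < h.length) : 1 ≤ spanF h i := by
  have h1 := lt_nseF h i hi
  have h2 := pseF_lt h i
  unfold spanF; omega

theorem spanF_le (h : List Int) (i : Nat) : spanF h i ≤ h.length := by
  have h1 := nseF_le h i
  have h2 := pseF_lb h i
  unfold spanF; omega


-- ===== B-side lemmas =====
def mnv (h : List Int) : Int := (PySem.List.min? h (fun y => y)).getD 0

-- generic running-max-of-a-projection facts (fold shape of both programs)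
theorem foldl_max_le {α : Type} (l : List α) (f : α → Int) (a B : Int)
    (hb : a ≤ B) (hf : ∀ x ∈ l, f x ≤ B) :
    l.foldl (fun acc y => max acc (f y)) a ≤ B := by
  induction l generalizing a with
  | nil => exact hb
  | cons x t ih =>
      simp only [List.foldl_cons]
      exact ih _ (max_le hb (hf x (by simp))) (fun y hy => hf y (by simp [hy]))

theorem foldl_max_proj_mem {α : Type} (l : List α) (f : α → Int) (a : Int) :
    l.foldl (fun acc y => max acc (f y)) a = a ∨
      ∃ x ∈ l, l.foldl (fun acc y => max acc (f y)) a = f x := by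
  induction l generalizing a with
  | nil => exact Or.inl rfl
  | cons x t ih =>
      simp only [List.foldl_cons]
      rcases ih (max a (f x)) with he | ⟨y, hy, he⟩
      · rcases max_choice a (f x) with hm | hm
        · exact Or.inl (by rw [he, hm])
        · exact Or.inr ⟨x, by simp, by rw [he, hm]⟩
      · exact Or.inr ⟨y, by simp [hy], he⟩

-- scans compute pseF / nseF
theorem msgScanL_char (h : List Int) (x : Int) (l : Nat) :
    -1 ≤ msgScanL h x l ∧ msgScanL h x l < (l : Int) ∧
    (msgScanL h x l = -1 ∨ hv h (msgScanL h x l).toNat < x) ∧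
    (∀ t : Nat, msgScanL h x l < (t : Int) → t < l → x ≤ hv h t) := by
  induction l with
  | zero =>
      refine ⟨by simp [msgScanL], by simp [msgScanL], Or.inl (by simp [msgScanL]), ?_⟩
      intro t _ ht; omega
  | succ l ih =>
      by_cases hc : x ≤ h.getD l 0
      · have he : msgScanL h x (l + 1) = msgScanL h x l := by
          simp only [msgScanL]; rw [if_pos hc]
        rw [he]
        refine ⟨ih.1, by have := ih.2.1; omega, ih.2.2.1, ?_⟩
        intro t h1 h2
        rcases Nat.lt_succ_iff_lt_or_eq.mp h2 with h3 | rfl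
        · exact ih.2.2.2 t h1 h3
        · exact hc
      · have he : msgScanL h x (l + 1) = (l : Int) := by
          simp only [msgScanL]; rw [if_neg hc]
        rw [he]
        refine ⟨by omega, by omega, Or.inr (by simpa using not_le.mp hc), ?_⟩
        intro t h1 h2; omega

theorem msgScanL_eq_pseF (h : List Int) (i : Nat) :
    msgScanL h (hv h i) i = pseF h i := by
  obtain ⟨h1, h2, h3, h4⟩ := msgScanL_char h (hv h i) i
  exact (pseF_eq h i _ h1 h2 h3 h4).symm

theorem msgScanR_char (h : List Int) (x : Int) (f r : Nat) :
    r ≤ msgScanR h x f r ∧ msgScanR h x f r ≤ r + f ∧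
    (msgScanR h x f r = r + f ∨ hv h (msgScanR h x f r) < x) ∧
    (∀ t : Nat, r ≤ t → t < msgScanR h x f r → x ≤ hv h t) := by
  induction f generalizing r with
  | zero =>
      refine ⟨le_rfl, by simp [msgScanR], Or.inl (by simp [msgScanR]), ?_⟩
      intro t h1 h2; simp [msgScanR] at h2; omega
  | succ f ih =>
      by_cases hc : x ≤ h.getD r 0
      · have he : msgScanR h x (f + 1) r = msgScanR h x f (r + 1) := by
          simp only [msgScanR]; rw [if_pos hc]
        rw [he]
        obtain ⟨i1, i2, i3, i4⟩ := ih (r + 1)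
        refine ⟨by omega, by omega, by omega, ?_⟩
        intro t h1 h2
        rcases Nat.lt_or_ge t (r + 1) with h3 | h3
        · have : t = r := by omega
          subst this; exact hc
        · exact i4 t h3 h2
      · have he : msgScanR h x (f + 1) r = r := by
          simp only [msgScanR]; rw [if_neg hc]
        rw [he]
        refine ⟨le_rfl, by omega, Or.inr (by simpa using not_le.mp hc), ?_⟩
        intro t h1 h2; omega

theorem msgScanR_eq_nseF (h : List Int) (i : Nat) (hi : i < h.length) :
    msgScanR h (hv h i) (h.length - (i + 1)) (i + 1) = nseF h i := by
  obtain ⟨h1, h2, h3, h4⟩ := msgScanR_char h (hv h i) (h.length - (i + 1)) (i + 1)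
  have hs : i + 1 + (h.length - (i + 1)) = h.length := by omega
  rw [hs] at h2 h3
  exact (nseF_eq h i _ (by omega) h2 h3 (fun t ht1 ht2 => h4 t (by omega) ht2)).symm

-- the minimum of h and its full-width window
theorem mnv_facts (h : List Int) (hne : h ≠ []) :
    (∃ i0, i0 < h.length ∧ hv h i0 = mnv h ∧ spanF h i0 = h.length) ∧
    (∀ t, t < h.length → mnv h ≤ hv h t) := by
  obtain ⟨v, hvs⟩ : ∃ v, PySem.List.min? h (fun y => y) = some v := by
    rcases he : PySem.List.min? h (fun y => y) with _ | v
    · exact absurd ((PySem.List.min?_eq_none_iff h (fun y => y)).mp he) hne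
    · exact ⟨v, rfl⟩
  have hmnv : mnv h = v := by simp [mnv, hvs]
  have hmem : v ∈ h := PySem.List.min?_mem hvs
  have hmin : ∀ y ∈ h, v ≤ y := fun y hy => PySem.List.min?_isMin hvs y hy
  have hallt : ∀ t, t < h.length → mnv h ≤ hv h t := by
    intro t ht
    rw [hmnv]
    have : hv h t ∈ h := by
      unfold hv
      rw [List.getD_eq_getElem h 0 ht]
      exact List.getElem_mem ht
    exact hmin _ this
  obtain ⟨i0, hi0, hgi⟩ := List.mem_iff_getElem.mp hmem
  have hhv : hv h i0 = mnv h := by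
    unfold hv; rw [List.getD_eq_getElem h 0 hi0, hgi, hmnv]
  refine ⟨⟨i0, hi0, hhv, ?_⟩, hallt⟩
  have hn : nseF h i0 = h.length :=
    nseF_eq h i0 h.length hi0 le_rfl (Or.inl rfl)
      (fun t _ ht2 => by rw [hhv]; exact hallt t ht2)
  have hp : pseF h i0 = -1 :=
    pseF_eq h i0 (-1) le_rfl (by omega) (Or.inl rfl)
      (fun t ht1 ht2 => by rw [hhv]; exact hallt t (by omega))
  unfold spanF
  rw [hn, hp]
  omega

-- best minimum over windows of size k, as a running max over qualifying positions
def ansF (h : List Int) (k : Int) : Int :=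
  ((List.range h.length).filter (fun i => decide (k ≤ spanF h i))).foldl
    (fun a i => max a (hv h i)) (mnv h)


def refOut (h : List Int) : List Int :=
  (List.range h.length).map (fun p : Nat => ansF h ((p : Int) + 1))

theorem le_ansF (h : List Int) (k : Int) (i : Nat) (hi : i < h.length)
    (hsp : k ≤ spanF h i) : hv h i ≤ ansF h k := by
  refine (PySem.List.le_foldl_max_int _ _ _).2 i ?_
  simp [List.mem_filter, List.mem_range, hi, hsp]

theorem mnv_le_ansF (h : List Int) (k : Int) : mnv h ≤ ansF h k :=
  (PySem.List.le_foldl_max_int _ _ _).1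

theorem ansF_cases (h : List Int) (k : Int) :
    ansF h k = mnv h ∨ ∃ i, i < h.length ∧ k ≤ spanF h i ∧ ansF h k = hv h i := by
  rcases foldl_max_proj_mem ((List.range h.length).filter (fun i => decide (k ≤ spanF h i))) (hv h) (mnv h) with he | ⟨i, hi, he⟩
  · exact Or.inl he
  · simp only [List.mem_filter, List.mem_range, decide_eq_true_eq] at hi
    exact Or.inr ⟨i, hi.1, hi.2, he⟩


-- B's first loop, with the scans replaced by their values
def bstep (h : List Int) (r : List Int) (i : Nat) : List Int :=
  if r.getD (spanF h i - 1).toNat 0 < hv h i then PySem.List.pySetD r (spanF h i - 1) (hv h i) else r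

-- B's propagation step
def pstepD (r : List Int) (k : Nat) : List Int :=
  if r.getD k 0 < r.getD (k + 1) 0 then PySem.List.pySetD r (k : Int) (r.getD (k + 1) 0) else r

theorem bstep_getD (h : List Int) (r : List Int) (i : Nat) (hi : i < h.length)
    (hlen : r.length = h.length) :
    (bstep h r i).length = h.length ∧
    ∀ p, p < h.length →
      (bstep h r i).getD p 0 =
        if spanF h i = (p : Int) + 1 then max (r.getD p 0) (hv h i) else r.getD p 0 := by
  have h1 := spanF_pos h i hi
  have h2 := spanF_le h i
  have hq : PySem.List.pySetD r (spanF h i - 1) (hv h i) = r.set (spanF h i - 1).toNat (hv h i) :=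
    PySem.List.pySetD_of_nonneg r (hv h i) (by omega)
  have hqlt : (spanF h i - 1).toNat < r.length := by omega
  constructor
  · unfold bstep
    split_ifs with hc
    · rw [hq, List.length_set, hlen]
    · exact hlen
  · intro p hp
    have hiff : (spanF h i = (p : Int) + 1) ↔ ((spanF h i - 1).toNat = p) := by omega
    by_cases he : spanF h i = (p : Int) + 1
    · have hqp : (spanF h i - 1).toNat = p := hiff.mp he
      rw [if_pos he]
      unfold bstep
      rw [hq, hqp]
      by_cases hc : r.getD p 0 < hv h i
      · rw [if_pos hc]
        rw [List.getD_eq_getElem _ 0 (by rw [List.length_set]; omega : p < (r.set p (hv h i)).length)]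
        rw [List.getElem_set, if_pos rfl]
        omega
      · rw [if_neg hc]
        omega
    · rw [if_neg he]
      unfold bstep
      split_ifs with hc
      · rw [hq]
        rw [List.getD_eq_getElem _ 0 (by rw [List.length_set]; omega : p < (r.set (spanF h i - 1).toNat (hv h i)).length)]
        rw [List.getElem_set, if_neg (fun hh => he (hiff.mpr hh))]
        exact (List.getD_eq_getElem r 0 (by omega)).symm
      · rfl

theorem fill_getD (h : List Int) (l : List Nat) (r : List Int)
    (hlen : r.length = h.length) (hl : ∀ i ∈ l, i < h.length) :
    (l.foldl (bstep h) r).length = h.length ∧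
    ∀ p, p < h.length →
      (l.foldl (bstep h) r).getD p 0 =
        (l.filter (fun i => decide (spanF h i = (p : Int) + 1))).foldl
          (fun a i => max a (hv h i)) (r.getD p 0) := by
  induction l generalizing r with
  | nil => exact ⟨hlen, fun p hp => rfl⟩
  | cons i t ih =>
      have hi : i < h.length := hl i (by simp)
      obtain ⟨hl1, hl2⟩ := bstep_getD h r i hi hlen
      obtain ⟨ih1, ih2⟩ := ih (bstep h r i) hl1 (fun j hj => hl j (by simp [hj]))
      refine ⟨ih1, ?_⟩
      intro p hp
      simp only [List.foldl_cons, List.filter_cons]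
      rw [ih2 p hp, hl2 p hp]
      by_cases he : spanF h i = (p : Int) + 1
      · rw [if_pos he, if_pos (by simpa using he)]
        simp
      · rw [if_neg he, if_neg (by simpa using he)]

def sufmax (r : List Int) : Nat → Nat → Int
  | p, 0 => r.getD p 0
  | p, c + 1 => max (r.getD p 0) (sufmax r (p + 1) c)

theorem pstepD_getD (r : List Int) (K : Nat) (hK : K < r.length) (p : Nat) :
    (pstepD r K).getD p 0 =
      if p = K then max (r.getD K 0) (r.getD (K + 1) 0) else r.getD p 0 := by
  have hq : PySem.List.pySetD r (K : Int) (r.getD (K + 1) 0) = r.set K (r.getD (K + 1) 0) := by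
    rw [PySem.List.pySetD_of_nonneg r (r.getD (K + 1) 0) (by omega : (0:Int) ≤ (K : Int))]
    simp
  unfold pstepD
  split_ifs with hc he he
  · subst he
    rw [hq, List.getD_eq_getElem _ 0 (by simpa using hK), List.getElem_set, if_pos rfl]
    omega
  · rw [hq]
    by_cases hp : p < r.length
    · rw [List.getD_eq_getElem _ 0 (by simpa using hp), List.getElem_set, if_neg (fun hh => he hh.symm),
        List.getD_eq_getElem r 0 hp]
    · rw [List.getD_eq_default _ _ (by simpa using not_lt.mp hp),
          List.getD_eq_default _ _ (not_lt.mp hp)]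
  · subst he; omega
  · rfl

theorem pstepD_length (r : List Int) (K : Nat) : (pstepD r K).length = r.length := by
  unfold pstepD
  split_ifs with hc
  · simp [PySem.List.pySetD_natCast]
  · rfl

theorem sufmax_pstep (r : List Int) (K : Nat) (hK : K < r.length) :
    ∀ c p, p + c = K → sufmax (pstepD r K) p c = sufmax r p (c + 1) := by
  intro c
  induction c with
  | zero =>
      intro p hp
      have hpK : p = K := by omega
      show (pstepD r K).getD p 0 = max (r.getD p 0) (sufmax r (p + 1) 0)
      rw [pstepD_getD r K hK p, if_pos hpK, hpK]
      rfl
  | succ c ihc =>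
      intro p hp
      show max ((pstepD r K).getD p 0) (sufmax (pstepD r K) (p + 1) c) =
        max (r.getD p 0) (sufmax r (p + 1) (c + 1))
      rw [pstepD_getD r K hK p, if_neg (by omega), ihc (p + 1) (by omega)]

theorem prop_getD (K : Nat) : ∀ (r : List Int), K < r.length →
    ((((List.range K).reverse).foldl pstepD r).length = r.length) ∧
    ∀ p, (((List.range K).reverse).foldl pstepD r).getD p 0 =
      if p < K then sufmax r p (K - p) else r.getD p 0 := by
  induction K with
  | zero => intro r _; exact ⟨rfl, fun p => by simp⟩
  | succ K ih =>
      intro r hK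
      have hrw : ((List.range (K + 1)).reverse).foldl pstepD r =
          ((List.range K).reverse).foldl pstepD (pstepD r K) := by
        rw [List.range_succ, List.reverse_append]
        rfl
      have hK' : K < (pstepD r K).length := by rw [pstepD_length]; omega
      obtain ⟨ih1, ih2⟩ := ih (pstepD r K) hK'
      rw [hrw]
      refine ⟨by rw [ih1, pstepD_length], ?_⟩
      intro p
      rw [ih2 p]
      by_cases h1 : p < K
      · rw [if_pos h1, if_pos (by omega)]
        have := sufmax_pstep r K (by omega) (K - p) p (by omega)
        rw [this]
        congr 1
        omega
      · rw [if_neg h1, pstepD_getD r K (by omega) p]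
        by_cases h2 : p = K
        · rw [if_pos h2, if_pos (by omega), h2]
          have hone : K + 1 - K = 1 := by omega
          rw [hone]
          rfl
        · rw [if_neg h2, if_neg (by omega)]

theorem sufmax_le (r : List Int) (B : Int) :
    ∀ c p, (∀ q, p ≤ q → q ≤ p + c → r.getD q 0 ≤ B) → sufmax r p c ≤ B := by
  intro c
  induction c with
  | zero => intro p hq; exact hq p le_rfl (by omega)
  | succ c ihc =>
      intro p hq
      exact max_le (hq p le_rfl (by omega)) (ihc (p + 1) (fun q h1 h2 => hq q (by omega) (by omega)))

theorem entry_le_sufmax (r : List Int) :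
    ∀ c p q, p ≤ q → q ≤ p + c → r.getD q 0 ≤ sufmax r p c := by
  intro c
  induction c with
  | zero => intro p q h1 h2; have : q = p := by omega
            subst this; exact le_rfl
  | succ c ihc =>
      intro p q h1 h2
      by_cases he : q = p
      · subst he; exact le_max_left _ _
      · exact le_trans (ihc (p + 1) q (by omega) (by omega)) (le_max_right _ _)


-- the G q entry of B's first array
def entG (h : List Int) (q : Nat) : Int :=
  ((List.range h.length).filter (fun i => decide (spanF h i = (q : Int) + 1))).foldl
    (fun a i => max a (hv h i)) (mnv h)

theorem mnv_le_entG (h : List Int) (q : Nat) : mnv h ≤ entG h q :=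
  (PySem.List.le_foldl_max_int _ _ _).1

theorem le_entG (h : List Int) (q i : Nat) (hi : i < h.length)
    (hsp : spanF h i = (q : Int) + 1) : hv h i ≤ entG h q := by
  refine (PySem.List.le_foldl_max_int _ _ _).2 i ?_
  simp [List.mem_filter, List.mem_range, hi, hsp]

theorem entG_le_ansF (h : List Int) (q : Nat) (p : Nat) (hpq : p ≤ q) :
    entG h q ≤ ansF h ((p : Int) + 1) := by
  refine foldl_max_le _ _ _ _ (mnv_le_ansF h _) ?_
  intro i hi
  simp only [List.mem_filter, List.mem_range, decide_eq_true_eq] at hi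
  exact le_ansF h _ i hi.1 (by omega)

-- the core identity: suffix maximum of the width-indexed array = best minimum for size p+1
theorem sufmax_entG_eq_ansF (h : List Int) (r1 : List Int)
    (hr1 : ∀ q, q < h.length → r1.getD q 0 = entG h q) (p : Nat) (hp : p < h.length) :
    sufmax r1 p (h.length - 1 - p) = ansF h ((p : Int) + 1) := by
  apply le_antisymm
  · apply sufmax_le
    intro q h1 h2
    rw [hr1 q (by omega)]
    exact entG_le_ansF h q p h1
  · rcases ansF_cases h ((p : Int) + 1) with he | ⟨i, hi, hsp, he⟩
    · rw [he]
      calc mnv h ≤ entG h p := mnv_le_entG h p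
        _ = r1.getD p 0 := (hr1 p hp).symm
        _ ≤ sufmax r1 p (h.length - 1 - p) := entry_le_sufmax r1 _ p p le_rfl (by omega)
    · rw [he]
      have h1 := spanF_pos h i hi
      have h2 := spanF_le h i
      set q : Nat := (spanF h i - 1).toNat with hq
      have hqe : spanF h i = (q : Int) + 1 := by omega
      calc hv h i ≤ entG h q := le_entG h q i hi hqe
        _ = r1.getD q 0 := (hr1 q (by omega)).symm
        _ ≤ sufmax r1 p (h.length - 1 - p) := entry_le_sufmax r1 _ p q (by omega) (by omega)



theorem alt_eq_refOut_pos (n : Int) (heights : List Int) (hn : 0 < n) :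
    max_strength_groups_alt n heights = refOut (heights.take n.toNat) := by
  unfold max_strength_groups_alt
  rw [if_neg (by omega)]
  rw [PySem.List.slice_to heights (by omega)]
  set h : List Int := heights.take n.toNat with hh
  dsimp only
  by_cases hm0 : h.length = 0
  · rw [if_pos hm0]
    unfold refOut
    rw [hm0]
    rfl
  · rw [if_neg hm0]
    have hstep : (List.range h.length).foldl
        (fun (r : List Int) i =>
          if r.getD (((msgScanR h (h.getD i 0) (h.length - (i + 1)) (i + 1) : Int) - msgScanL h (h.getD i 0) i - 1 - 1).toNat) 0 < h.getD i 0
          then PySem.List.pySetD r ((msgScanR h (h.getD i 0) (h.length - (i + 1)) (i + 1) : Int) - msgScanL h (h.getD i 0) i - 1 - 1) (h.getD i 0)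
          else r)
        (List.replicate h.length ((PySem.List.min? h (fun y => y)).getD 0))
        = (List.range h.length).foldl (bstep h) (List.replicate h.length (mnv h)) := by
      apply PySem.List.foldl_congr_mem
      intro r i hi
      have hil : i < h.length := List.mem_range.mp hi
      have hL : msgScanL h (h.getD i 0) i = pseF h i := msgScanL_eq_pseF h i
      have hR : msgScanR h (h.getD i 0) (h.length - (i + 1)) (i + 1) = nseF h i :=
        msgScanR_eq_nseF h i (by omega)
      rw [hL, hR]
      unfold bstep spanF
      rfl
    rw [hstep]
    have hps : (fun (r : List Int) k =>
        if r.getD k 0 < r.getD (k + 1) 0 then PySem.List.pySetD r (k : Int) (r.getD (k + 1) 0) else r) = pstepD := rfl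
    rw [hps]
    set r1 : List Int := (List.range h.length).foldl (bstep h) (List.replicate h.length (mnv h)) with hr1
    obtain ⟨hlen1, hent1⟩ := fill_getD h (List.range h.length) (List.replicate h.length (mnv h))
      (by simp) (fun i hi => List.mem_range.mp hi)
    have hr1ent : ∀ q, q < h.length → r1.getD q 0 = entG h q := by
      intro q hq
      rw [hr1, hent1 q hq]
      unfold entG
      rw [List.getD_replicate _ (by omega)]
    have hK : h.length - 1 < r1.length := by rw [hr1, hlen1]; omega
    obtain ⟨hlen2, hent2⟩ := prop_getD (h.length - 1) r1 hK
    apply List.ext_getElem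
    · rw [hlen2, hr1, hlen1]
      unfold refOut
      simp
    · intro p hp1 hp2
      have hpm : p < h.length := by rw [hlen2, hr1, hlen1] at hp1; omega
      rw [← List.getD_eq_getElem _ 0 hp1]
      rw [hent2 p]
      have hcollapse : (if p < h.length - 1 then sufmax r1 p (h.length - 1 - p) else r1.getD p 0)
          = sufmax r1 p (h.length - 1 - p) := by
        by_cases hc : p < h.length - 1
        · rw [if_pos hc]
        · rw [if_neg hc]
          have h0 : h.length - 1 - p = 0 := by omega
          rw [h0]
          rfl
      rw [hcollapse, sufmax_entG_eq_ansF h r1 hr1ent p hpm]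
      simp only [refOut]
      rw [List.getElem_map, List.getElem_range]


-- ===== A-side lemmas =====
-- Nat-indexed model of A's while-pop loop over the prefix h
def popM (h : List Int) (x : Nat) : List Int → List Nat → List Int × List Nat
  | arr, [] => (arr, [])
  | arr, j :: rest =>
      if hv h x < hv h j then popM h x (arr.set j (x : Int)) rest else (arr, j :: rest)

theorem popM_cons (h : List Int) (x : Nat) (arr : List Int) (j : Nat) (rest : List Nat) :
    popM h x arr (j :: rest) =
      if hv h x < hv h j then popM h x (arr.set j (x : Int)) rest else (arr, j :: rest) := rfl

theorem popM_spec (h : List Int) (x : Nat) (arr : List Int) (st : List Nat)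
    (mono : st.Pairwise (fun a b => hv h b ≤ hv h a)) :
    popM h x arr st =
      ((st.filter (fun j => decide (hv h x < hv h j))).foldl (fun a j => a.set j (x : Int)) arr,
       st.filter (fun j => !decide (hv h x < hv h j))) := by
  induction st generalizing arr with
  | nil => rfl
  | cons j rest ih =>
      by_cases hc : hv h x < hv h j
      · have h1 : popM h x arr (j :: rest) = popM h x (arr.set j (x : Int)) rest := by
          rw [popM_cons, if_pos hc]
        rw [h1, ih _ (List.Pairwise.of_cons mono)]
        simp [hc]
      · have h1 : popM h x arr (j :: rest) = (arr, j :: rest) := by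
          rw [popM_cons, if_neg hc]
        rw [h1]
        have hrest : ∀ y ∈ rest, ¬ hv h x < hv h y := by
          intro y hy
          have := (List.pairwise_cons.mp mono).1 y hy
          omega
        have h2 : (j :: rest).filter (fun j => decide (hv h x < hv h j)) = [] := by
          simp only [List.filter_cons, decide_eq_true_eq]
          rw [if_neg (by simpa using hc)]
          rw [List.filter_eq_nil_iff]
          intro y hy
          simpa using hrest y hy
        have h3 : (j :: rest).filter (fun j => !decide (hv h x < hv h j)) = j :: rest := by
          rw [List.filter_eq_self]
          intro y hy
          rcases hy with _ | hy
          · simpa using hc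
          · simpa using hrest y (by assumption)
        rw [h2, h3]
        rfl

theorem getD_foldl_set (l : List Nat) (v : Int) (arr : List Int)
    (hl : ∀ j ∈ l, j < arr.length) :
    ((l.foldl (fun a j => a.set j v) arr).length = arr.length) ∧
    ∀ p : Nat, (l.foldl (fun a j => a.set j v) arr).getD p 0 =
      if p ∈ l then v else arr.getD p 0 := by
  induction l generalizing arr with
  | nil => exact ⟨rfl, fun p => by simp⟩
  | cons j t ih =>
      have hj : j < arr.length := hl j (by simp)
      obtain ⟨ih1, ih2⟩ := ih (arr.set j v) (fun q hq => by rw [List.length_set]; exact hl q (by simp [hq]))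
      refine ⟨by rw [List.foldl_cons, ih1, List.length_set], ?_⟩
      intro p
      rw [List.foldl_cons, ih2 p]
      by_cases hpt : p ∈ t
      · rw [if_pos hpt, if_pos (by simp [hpt])]
      · rw [if_neg hpt]
        by_cases hpj : p = j
        · subst hpj
          rw [if_pos (by simp), List.getD_eq_getElem _ 0 (by rw [List.length_set]; exact hj),
            List.getElem_set, if_pos rfl]
        · rw [if_neg (by simp [hpj, hpt])]
          by_cases hpl : p < arr.length
          · rw [List.getD_eq_getElem _ 0 (by rw [List.length_set]; exact hpl),
              List.getElem_set, if_neg (fun hh => hpj hh.symm), List.getD_eq_getElem arr 0 hpl]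
          · rw [List.getD_eq_default _ _ (by rw [List.length_set]; omega),
              List.getD_eq_default _ _ (by omega)]

-- "j is still a candidate after processing indices ≤ i": no strictly smaller value in (j, i]
def keepB (h : List Int) (i j : Nat) : Bool := decide (∀ t, t ≤ i → j < t → hv h j ≤ hv h t)


def step1 (h : List Int) (s : List Int × List Nat) (x : Nat) : List Int × List Nat :=
  ((popM h x s.1 s.2).1, x :: (popM h x s.1 s.2).2)

def Inv1 (h : List Int) (i : Nat) (s : List Int × List Nat) : Prop :=
  s.2 = ((List.range (i + 1)).filter (keepB h i)).reverse ∧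
  s.1.length = h.length ∧
  ∀ j, j < h.length → s.1.getD j 0 = if nseF h j ≤ i then (nseF h j : Int) else (h.length : Int)

theorem stack_mono (h : List Int) (i : Nat) :
    (((List.range (i + 1)).filter (keepB h i)).reverse).Pairwise (fun a b => hv h b ≤ hv h a) := by
  rw [List.pairwise_reverse]
  have hpl : ((List.range (i + 1)).filter (keepB h i)).Pairwise (· < ·) :=
    List.Pairwise.filter _ (List.pairwise_lt_range)
  refine List.Pairwise.imp_of_mem ?_ hpl
  intro a b ha hb hab
  simp only [List.mem_filter, List.mem_range] at ha hb
  have hk := of_decide_eq_true ha.2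
  exact hk b (by omega) hab

theorem keepB_self (h : List Int) (i : Nat) : keepB h i i = true := by
  simp only [keepB, decide_eq_true_eq]
  intro t ht1 ht2; omega

theorem inv1_step (h : List Int) (i : Nat) (hi : i + 1 < h.length)
    (s : List Int × List Nat) (hs : Inv1 h i s) : Inv1 h (i + 1) (step1 h s (i + 1)) := by
  obtain ⟨hst, hlen, hent⟩ := hs
  have hmono : s.2.Pairwise (fun a b => hv h b ≤ hv h a) := hst ▸ stack_mono h i
  have hpop := popM_spec h (i + 1) s.1 s.2 hmono
  have hbnd : ∀ j ∈ s.2.filter (fun j => decide (hv h (i + 1) < hv h j)), j < s.1.length := by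
    intro j hj
    have hj2 := List.mem_of_mem_filter hj
    rw [hst] at hj2
    have := List.mem_of_mem_filter (List.mem_reverse.mp hj2)
    rw [List.mem_range] at this
    omega
  obtain ⟨hflen, hfent⟩ := getD_foldl_set (s.2.filter (fun j => decide (hv h (i + 1) < hv h j)))
    ((i + 1 : Nat) : Int) s.1 hbnd
  have hmempop : ∀ j : Nat, j ∈ s.2.filter (fun j => decide (hv h (i + 1) < hv h j)) ↔
      (j < i + 1 ∧ keepB h i j = true ∧ hv h (i + 1) < hv h j) := by
    intro j
    rw [List.mem_filter, hst, List.mem_reverse, List.mem_filter, List.mem_range]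
    simp only [decide_eq_true_eq]
    tauto
  refine ⟨?_, ?_, ?_⟩
  · -- the new stack
    show (i + 1) :: (popM h (i + 1) s.1 s.2).2 = _
    rw [hpop]
    rw [List.range_succ (n := i + 1), List.filter_append, List.reverse_append]
    have h2 : List.filter (keepB h (i + 1)) [i + 1] = [i + 1] := by
      simp [keepB_self h (i + 1)]
    rw [h2]
    simp only [List.reverse_cons, List.reverse_nil, List.nil_append, List.singleton_append]
    rw [hst, List.filter_reverse, List.filter_filter]
    congr 1
    rw [List.reverse_inj]
    apply List.filter_congr
    intro j hj
    rw [List.mem_range] at hj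
    apply Bool.eq_iff_iff.mpr
    simp only [Bool.and_eq_true, Bool.not_eq_true', decide_eq_false_iff_not, keepB,
      decide_eq_true_eq]
    constructor
    · rintro ⟨hnot, hk⟩ t ht1 ht2
      by_cases hti : t ≤ i
      · exact hk t hti ht2
      · have : t = i + 1 := by omega
        subst this
        omega
    · intro hk
      refine ⟨?_, fun t ht1 ht2 => hk t (by omega) ht2⟩
      have := hk (i + 1) le_rfl (by omega)
      omega
  · show (popM h (i + 1) s.1 s.2).1.length = h.length
    rw [hpop]
    exact hflen.trans hlen
  · show ∀ j, j < h.length → (popM h (i + 1) s.1 s.2).1.getD j 0 = _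
    intro j hj
    rw [hpop]
    simp only
    rw [hfent j]
    by_cases hpopj : j ∈ s.2.filter (fun j => decide (hv h (i + 1) < hv h j))
    · rw [if_pos hpopj]
      obtain ⟨hj1, hj2, hj3⟩ := (hmempop j).mp hpopj
      have hnse : nseF h j = i + 1 := by
        apply nseF_eq h j (i + 1) (by omega) (by omega) (Or.inr hj3)
        intro t ht1 ht2
        exact (of_decide_eq_true hj2) t (by omega) ht1
      rw [hnse, if_pos (le_refl (i + 1))]
    · rw [if_neg hpopj, hent j hj]
      by_cases hle : nseF h j ≤ i
      · rw [if_pos hle, if_pos (by omega)]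
      · rw [if_neg hle]
        by_cases heq : nseF h j = i + 1
        · exfalso
          apply hpopj
          rw [hmempop j]
          have hj1 : j < i + 1 := by have := lt_nseF h j hj; omega
          have hj3 : hv h (i + 1) < hv h j := by
            have := nseF_hit h j (by omega)
            rw [heq] at this; exact this
          refine ⟨hj1, ?_, hj3⟩
          simp only [keepB, decide_eq_true_eq]
          intro t ht1 ht2
          exact nseF_between h j t ht2 (by omega)
        · rw [if_neg (by omega)]


theorem inv1_loop (h : List Int) (hm : 1 ≤ h.length) :
    ∀ c, c ≤ h.length - 1 →
      Inv1 h c ((List.range' 1 c).foldl (step1 h)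
        (List.replicate h.length (h.length : Int), [0])) := by
  intro c
  induction c with
  | zero =>
      intro _
      simp only [List.range'_zero, List.foldl_nil]
      refine ⟨?_, by simp, ?_⟩
      · show [0] = _
        have : List.range 1 = [0] := rfl
        rw [this]
        simp [keepB_self h 0]
      · intro j hj
        rw [if_neg (by have := lt_nseF h j hj; omega)]
        rw [List.getD_replicate _ hj]
  | succ c ih =>
      intro hc
      rw [List.range'_1_concat, List.foldl_append, List.foldl_cons, List.foldl_nil]
      have h1c : 1 + c = c + 1 := by omega
      rw [h1c]
      exact inv1_step h c (by omega) _ (ih (by omega))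


-- the first loop computes nseF everywhere
theorem nse_final (h : List Int) (hm : 1 ≤ h.length) :
    let s := (List.range' 1 (h.length - 1)).foldl (step1 h)
      (List.replicate h.length (h.length : Int), [0])
    s.1.length = h.length ∧ ∀ j, j < h.length → s.1.getD j 0 = (nseF h j : Int) := by
  obtain ⟨hst, hlen, hent⟩ := inv1_loop h hm (h.length - 1) le_rfl
  refine ⟨hlen, ?_⟩
  intro j hj
  rw [hent j hj]
  have h1 := nseF_le h j
  by_cases hc : nseF h j ≤ h.length - 1
  · rw [if_pos hc]
  · rw [if_neg hc]
    have : nseF h j = h.length := by omega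
    rw [this]


-- mirrored machinery for the second (previous-smaller) loop; base b = lowest processed index
def keepB2 (h : List Int) (b j : Nat) : Bool := decide (∀ t, t < j → b ≤ t → hv h j ≤ hv h t)

def Inv2 (h : List Int) (b : Nat) (s : List Int × List Nat) : Prop :=
  s.2 = (List.range' b (h.length - b)).filter (keepB2 h b) ∧
  s.1.length = h.length ∧
  ∀ j, j < h.length → s.1.getD j 0 = if (b : Int) ≤ pseF h j then pseF h j else -1

theorem keepB2_self (h : List Int) (b : Nat) : keepB2 h b b = true := by
  simp only [keepB2, decide_eq_true_eq]
  intro t ht1 ht2; omega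

theorem stack2_mono (h : List Int) (b : Nat) :
    ((List.range' b (h.length - b)).filter (keepB2 h b)).Pairwise (fun a b => hv h b ≤ hv h a) := by
  have hpl : ((List.range' b (h.length - b)).filter (keepB2 h b)).Pairwise (· < ·) :=
    List.Pairwise.filter _ (List.pairwise_lt_range')
  refine List.Pairwise.imp_of_mem ?_ hpl
  intro a c ha hc hac
  simp only [List.mem_filter, List.mem_range'_1] at ha hc
  have hk := of_decide_eq_true hc.2
  exact hk a hac ha.1.1

theorem inv2_step (h : List Int) (b : Nat) (hb : b + 1 < h.length)
    (s : List Int × List Nat) (hs : Inv2 h (b + 1) s) : Inv2 h b (step1 h s b) := by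
  obtain ⟨hst, hlen, hent⟩ := hs
  have hmono : s.2.Pairwise (fun a c => hv h c ≤ hv h a) := hst ▸ stack2_mono h (b + 1)
  have hpop := popM_spec h b s.1 s.2 hmono
  have hbnd : ∀ j ∈ s.2.filter (fun j => decide (hv h b < hv h j)), j < s.1.length := by
    intro j hj
    have hj2 := List.mem_of_mem_filter hj
    rw [hst] at hj2
    have := List.mem_of_mem_filter hj2
    rw [List.mem_range'_1] at this
    omega
  obtain ⟨hflen, hfent⟩ := getD_foldl_set (s.2.filter (fun j => decide (hv h b < hv h j)))
    ((b : Nat) : Int) s.1 hbnd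
  have hmempop : ∀ j : Nat, j ∈ s.2.filter (fun j => decide (hv h b < hv h j)) ↔
      (b + 1 ≤ j ∧ j < h.length ∧ keepB2 h (b + 1) j = true ∧ hv h b < hv h j) := by
    intro j
    rw [List.mem_filter, hst, List.mem_filter, List.mem_range'_1]
    simp only [decide_eq_true_eq]
    constructor
    · rintro ⟨⟨⟨h1, h2⟩, h3⟩, h4⟩; exact ⟨h1, by omega, h3, h4⟩
    · rintro ⟨h1, h2, h3, h4⟩; exact ⟨⟨⟨h1, by omega⟩, h3⟩, h4⟩
  refine ⟨?_, ?_, ?_⟩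
  · show b :: (popM h b s.1 s.2).2 = _
    rw [hpop]
    have hmb : h.length - b = (h.length - b - 1) + 1 := by omega
    rw [hmb, List.range'_succ, List.filter_cons]
    rw [if_pos (by simp [keepB2_self h b])]
    congr 1
    show List.filter (fun j => !decide (hv h b < hv h j)) s.2 = _
    rw [hst, List.filter_filter]
    have hlen2 : h.length - b - 1 = h.length - (b + 1) := by omega
    rw [hlen2]
    apply List.filter_congr
    intro j hj
    rw [List.mem_range'_1] at hj
    apply Bool.eq_iff_iff.mpr
    simp only [Bool.and_eq_true, Bool.not_eq_true', decide_eq_false_iff_not, keepB2,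
      decide_eq_true_eq]
    constructor
    · rintro ⟨hnot, hk⟩ t ht1 ht2
      by_cases htb : b + 1 ≤ t
      · exact hk t ht1 htb
      · have : t = b := by omega
        subst this
        omega
    · intro hk
      refine ⟨?_, fun t ht1 ht2 => hk t ht1 (by omega)⟩
      have := hk b (by omega) le_rfl
      omega
  · show (popM h b s.1 s.2).1.length = h.length
    rw [hpop]
    exact hflen.trans hlen
  · show ∀ j, j < h.length → (popM h b s.1 s.2).1.getD j 0 = _
    intro j hj
    rw [hpop]
    simp only
    rw [hfent j]
    by_cases hpopj : j ∈ s.2.filter (fun j => decide (hv h b < hv h j))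
    · rw [if_pos hpopj]
      obtain ⟨hj1, hj2, hj3, hj4⟩ := (hmempop j).mp hpopj
      have hpse : pseF h j = (b : Int) := by
        apply pseF_eq h j (b : Int) (by omega) (by omega) (Or.inr (by simpa using hj4))
        intro t ht1 ht2
        exact (of_decide_eq_true hj3) t ht2 (by omega)
      rw [hpse, if_pos (by omega)]
    · rw [if_neg hpopj, hent j hj]
      by_cases hge : (b : Int) + 1 ≤ pseF h j
      · rw [if_pos (by exact_mod_cast hge), if_pos (by omega)]
      · rw [if_neg (by exact_mod_cast hge)]
        by_cases heq : pseF h j = (b : Int)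
        · exfalso
          apply hpopj
          rw [hmempop j]
          have hj1 : b + 1 ≤ j := by
            have := pseF_lt h j
            omega
          have hj4 : hv h b < hv h j := by
            have := pseF_hit h j (by omega)
            rw [heq] at this
            simpa using this
          refine ⟨hj1, hj, ?_, hj4⟩
          simp only [keepB2, decide_eq_true_eq]
          intro t ht1 ht2
          exact pseF_between h j t (by omega) ht1
        · rw [if_neg (by omega)]

theorem inv2_loop (h : List Int) (hm : 1 ≤ h.length) :
    ∀ c, c ≤ h.length - 1 →
      Inv2 h (h.length - 1 - c) (((List.range c).map (fun k => h.length - 2 - k)).foldl (step1 h)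
        (List.replicate h.length (-1 : Int), [h.length - 1])) := by
  intro c
  induction c with
  | zero =>
      intro _
      simp only [List.range_zero, List.map_nil, List.foldl_nil]
      refine ⟨?_, by simp, ?_⟩
      · show [h.length - 1] = _
        have h1 : h.length - (h.length - 1 - 0) = 1 := by omega
        rw [h1, List.range'_one]
        simp [keepB2_self]
      · intro j hj
        rw [if_neg (by have h1 := pseF_lt h j; omega)]
        rw [List.getD_replicate _ hj]
  | succ c ih =>
      intro hc
      rw [List.range_succ, List.map_append, List.foldl_append]
      simp only [List.map_cons, List.map_nil, List.foldl_cons, List.foldl_nil]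
      have hb : h.length - 1 - (c + 1) = h.length - 2 - c := by omega
      rw [hb]
      have hstep := inv2_step h (h.length - 2 - c) (by omega) _
        (by have hb2 : h.length - 1 - c = (h.length - 2 - c) + 1 := by omega
            rw [← hb2]
            exact ih (by omega))
      exact hstep

theorem pse_final (h : List Int) (hm : 1 ≤ h.length) :
    let s := ((List.range (h.length - 1)).map (fun k => h.length - 2 - k)).foldl (step1 h)
      (List.replicate h.length (-1 : Int), [h.length - 1])
    s.1.length = h.length ∧ ∀ j, j < h.length → s.1.getD j 0 = pseF h j := by
  obtain ⟨hst, hlen, hent⟩ := inv2_loop h hm (h.length - 1) le_rfl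
  refine ⟨hlen, ?_⟩
  intro j hj
  have hz : h.length - 1 - (h.length - 1) = 0 := by omega
  rw [hz] at hent
  rw [hent j hj]
  have h1 := pseF_lb h j
  by_cases hc : (0 : Int) ≤ pseF h j
  · rw [if_pos (by exact_mod_cast hc)]
  · rw [if_neg (by exact_mod_cast hc)]
    omega


-- per-value aggregated width (the dict's value for key v)
def W (h : List Int) (v : Int) : Int :=
  ((List.range h.length).filter (fun i => decide (hv h i = v))).foldl
    (fun a i => max a (spanF h i)) 0

theorem dic_getD_gen (h : List Int) (l : List Nat) (d : PySem.Dict Int Int) (v : Int) :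
    (l.foldl (fun d i => d.insert (hv h i) (max (d.getD (hv h i) 0) (spanF h i))) d).getD v 0 =
      (l.filter (fun i => decide (hv h i = v))).foldl
        (fun a i => max a (spanF h i)) (d.getD v 0) := by
  induction l generalizing d with
  | nil => rfl
  | cons i t ih =>
      simp only [List.foldl_cons, List.filter_cons]
      rw [ih]
      by_cases he : hv h i = v
      · rw [if_pos (by simpa using he)]
        simp only [List.foldl_cons]
        rw [PySem.Dict.getD_insert, if_pos he.symm, he]
      · rw [if_neg (by simpa using he)]
        rw [PySem.Dict.getD_insert, if_neg (fun hh => he hh.symm)]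

theorem W_nonneg (h : List Int) (v : Int) : 0 ≤ W h v :=
  (PySem.List.le_foldl_max_int _ _ _).1

theorem W_le (h : List Int) (v : Int) : W h v ≤ h.length := by
  apply foldl_max_le _ _ _ _ (by omega)
  intro i hi
  exact spanF_le h i

theorem span_le_W (h : List Int) (i : Nat) (hi : i < h.length) : spanF h i ≤ W h (hv h i) := by
  refine (PySem.List.le_foldl_max_int _ _ _).2 i ?_
  simp [List.mem_filter, List.mem_range, hi]

theorem W_achieved (h : List Int) (v : Int) (hpos : 0 < W h v) :
    ∃ i, i < h.length ∧ hv h i = v ∧ spanF h i = W h v := by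
  rcases foldl_max_proj_mem ((List.range h.length).filter (fun i => decide (hv h i = v)))
    (spanF h) 0 with he | ⟨i, hi, he⟩
  · exfalso; unfold W at hpos; omega
  · simp only [List.mem_filter, List.mem_range, decide_eq_true_eq] at hi
    exact ⟨i, hi.1, hi.2, he.symm⟩

theorem W_mnv (h : List Int) (hne : h ≠ []) : W h (mnv h) = (h.length : Int) := by
  obtain ⟨⟨i0, hi0, hhv, hsp⟩, _⟩ := mnv_facts h hne
  apply le_antisymm (W_le h _)
  calc (h.length : Int) = spanF h i0 := hsp.symm
    _ ≤ W h (hv h i0) := span_le_W h i0 hi0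
    _ = W h (mnv h) := by rw [hhv]

-- msgFill writes item into positions cnt .. cnt+t-1
theorem msgFill_spec (item : Int) : ∀ (t : Nat) (result : List Int) (cnt : Int), 0 ≤ cnt →
    (msgFill item t (result, cnt)).2 = cnt + t ∧
    (msgFill item t (result, cnt)).1.length = result.length ∧
    ∀ p : Nat, (msgFill item t (result, cnt)).1.getD p 0 =
      if cnt ≤ (p : Int) ∧ (p : Int) < cnt + t ∧ p < result.length then item
      else result.getD p 0 := by
  intro t
  induction t with
  | zero =>
      intro result cnt hc
      refine ⟨by simp [msgFill], rfl, ?_⟩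
      intro p
      rw [if_neg (by omega)]
      rfl
  | succ t ih =>
      intro result cnt hc
      have hstep : msgFill item (t + 1) (result, cnt) =
          msgFill item t (PySem.List.pySetD result (cnt + 1 - 1) item, cnt + 1) := rfl
      have hset : PySem.List.pySetD result (cnt + 1 - 1) item = result.set cnt.toNat item := by
        have : cnt + 1 - 1 = cnt := by omega
        rw [this]
        exact PySem.List.pySetD_of_nonneg result item hc
      obtain ⟨ih1, ih2, ih3⟩ := ih (result.set cnt.toNat item) (cnt + 1) (by omega)
      rw [hstep, hset]
      refine ⟨by rw [ih1]; push_cast; ring, by rw [ih2, List.length_set], ?_⟩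
      intro p
      rw [ih3 p]
      rw [List.length_set]
      by_cases hA : cnt + 1 ≤ (p : Int) ∧ (p : Int) < cnt + 1 + t ∧ p < result.length
      · rw [if_pos hA, if_pos (by push_cast at hA ⊢; omega)]
      · rw [if_neg hA]
        by_cases hB : cnt ≤ (p : Int) ∧ (p : Int) < cnt + (t + 1 : Nat) ∧ p < result.length
        · rw [if_pos hB]
          have hpc : (p : Int) = cnt := by push_cast at hA hB ⊢; omega
          have hpn : p = cnt.toNat := by omega
          rw [List.getD_eq_getElem _ 0 (by rw [List.length_set]; exact hB.2.2),
            List.getElem_set, if_pos hpn.symm]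
        · rw [if_neg hB]
          by_cases hpl : p < result.length
          · rw [List.getD_eq_getElem _ 0 (by rw [List.length_set]; exact hpl),
              List.getElem_set, List.getD_eq_getElem result 0 hpl]
            rw [if_neg (by push_cast at hA hB; omega)]
          · rw [List.getD_eq_default _ _ (by rw [List.length_set]; omega),
              List.getD_eq_default _ _ (by omega)]


-- invariant of A's final fill loop, over the processed (descending) distinct values
def FillInv (h : List Int) (processed : List Int) (s : List Int × Int) : Prop :=
  s.2 = (processed.map (W h)).foldl max 0 ∧
  s.1.length = h.length ∧
  (∀ p : Nat, p < h.length →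
    s.1.getD p 0 = (processed.filter (fun v => decide ((p : Int) < W h v))).headD 0) ∧
  (∀ p : Nat, (p : Int) < s.2 → processed.filter (fun v => decide ((p : Int) < W h v)) ≠ [])

theorem fill_inv_step (h : List Int) (processed : List Int) (r : List Int) (c : Int)
    (hs : FillInv h processed (r, c)) (v : Int) :
    FillInv h (processed ++ [v]) (msgFill v (W h v - c).toNat (r, c)) := by
  obtain ⟨hcnt, hlen, hent, hne⟩ := hs
  simp only at hcnt hlen hent hne
  have hc0 : 0 ≤ c := by rw [hcnt]; exact (PySem.List.le_foldl_max _ 0).1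
  obtain ⟨h1, h2, h3⟩ := msgFill_spec v (W h v - c).toNat r c hc0
  have hWv0 : 0 ≤ W h v := W_nonneg h v
  have hbound : ∀ y ∈ processed, W h y ≤ c := by
    rw [hcnt]
    intro y hy
    exact (PySem.List.le_foldl_max _ 0).2 (W h y) (List.mem_map_of_mem hy)
  have hmapf : ((processed ++ [v]).map (W h)).foldl max 0 = max c (W h v) := by
    rw [List.map_append, List.foldl_append]
    simp only [List.map_cons, List.map_nil, List.foldl_cons, List.foldl_nil]
    rw [← hcnt]
  refine ⟨?_, ?_, ?_, ?_⟩
  · rw [h1, hmapf]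
    omega
  · rw [h2]
    exact hlen
  · intro p hp
    rw [h3 p, List.filter_append]
    simp only [List.filter_cons, List.filter_nil]
    by_cases hpc : (p : Int) < c
    · rw [if_neg (by omega : ¬(c ≤ (p : Int) ∧ (p : Int) < c + ((W h v - c).toNat : Int) ∧ p < r.length))]
      rw [hent p hp]
      have hf : processed.filter (fun v => decide ((p : Int) < W h v)) ≠ [] := hne p hpc
      cases hfl : processed.filter (fun v => decide ((p : Int) < W h v)) with
      | nil => exact absurd hfl hf
      | cons a t => simp
    · have hfe : processed.filter (fun v => decide ((p : Int) < W h v)) = [] := by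
        rw [List.filter_eq_nil_iff]
        intro y hy
        simp only [decide_eq_true_eq, not_lt]
        have := hbound y hy
        omega
      rw [hfe, List.nil_append]
      by_cases hpv : (p : Int) < W h v
      · have hcond : c ≤ (p : Int) ∧ (p : Int) < c + ((W h v - c).toNat : Int) ∧ p < r.length :=
          ⟨by omega, by omega, by rw [hlen]; exact hp⟩
        rw [if_pos hcond, if_pos (by simpa using hpv)]
        rfl
      · have hcond : ¬(c ≤ (p : Int) ∧ (p : Int) < c + ((W h v - c).toNat : Int) ∧ p < r.length) := by
          omega
        rw [if_neg hcond, if_neg (by simpa using hpv)]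
        rw [hent p hp, hfe]
  · intro p hpm
    rw [h1] at hpm
    rw [List.filter_append]
    simp only [List.filter_cons, List.filter_nil]
    by_cases hpc : (p : Int) < c
    · intro habs
      rcases List.append_eq_nil_iff.mp habs with ⟨habs1, _⟩
      exact (hne p hpc) habs1
    · have hpv : (p : Int) < W h v := by omega
      rw [if_pos (by simpa using hpv)]
      simp

theorem fill_inv_loop (h : List Int) :
    ∀ (l processed : List Int) (s : List Int × Int), FillInv h processed s →
      FillInv h (processed ++ l)
        (l.foldl (fun s v => msgFill v (W h v - s.2).toNat s) s) := by
  intro l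
  induction l with
  | nil => intro processed s hs; simpa using hs
  | cons v t ih =>
      intro processed s hs
      have hstep : FillInv h (processed ++ [v]) (msgFill v (W h v - s.2).toNat s) := by
        obtain ⟨r, c⟩ := s
        exact fill_inv_step h processed r c hs v
      have := ih (processed ++ [v]) _ hstep
      simpa [List.append_assoc] using this

theorem fill_inv_init (h : List Int) :
    FillInv h [] (List.replicate h.length (0 : Int), 0) := by
  refine ⟨rfl, by simp, ?_, ?_⟩
  · intro p hp
    simp only [List.filter_nil, List.headD_nil]
    rw [List.getD_replicate _ hp]
  · intro p hpm
    simp at hpm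
    omega

-- head of the filtered descending distinct value list = the answer for size p+1
theorem headD_filter_eq_ansF (h : List Int) (hne : h ≠ []) (dvs : List Int)
    (hmem : ∀ v, v ∈ dvs ↔ ∃ i, i < h.length ∧ hv h i = v)
    (hpw : dvs.Pairwise (fun a b => b < a)) (p : Nat) (hp : p < h.length) :
    (dvs.filter (fun v => decide ((p : Int) < W h v))).headD 0 = ansF h ((p : Int) + 1) := by
  obtain ⟨⟨i0, hi0, hhv0, _⟩, hmin⟩ := mnv_facts h hne
  have hmn_mem : mnv h ∈ dvs := (hmem (mnv h)).mpr ⟨i0, hi0, hhv0⟩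
  have hmnW : (p : Int) < W h (mnv h) := by rw [W_mnv h hne]; omega
  have hmnF : mnv h ∈ dvs.filter (fun v => decide ((p : Int) < W h v)) := by
    rw [List.mem_filter]
    exact ⟨hmn_mem, by simpa using hmnW⟩
  cases hF : dvs.filter (fun v => decide ((p : Int) < W h v)) with
  | nil => rw [hF] at hmnF; simp at hmnF
  | cons f0 rest =>
      have hf0F : f0 ∈ dvs.filter (fun v => decide ((p : Int) < W h v)) := by rw [hF]; simp
      rw [List.mem_filter] at hf0F
      obtain ⟨hf0dvs, hf0W⟩ := hf0F
      have hf0W' : (p : Int) < W h f0 := by simpa using hf0W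
      have hFmax : ∀ y ∈ dvs.filter (fun v => decide ((p : Int) < W h v)), y ≤ f0 := by
        intro y hy
        rw [hF] at hy
        rcases hy with _ | hy
        · exact le_rfl
        · have hpwF : (dvs.filter (fun v => decide ((p : Int) < W h v))).Pairwise (fun a b => b < a) :=
            List.Pairwise.filter _ hpw
          rw [hF] at hpwF
          have := (List.pairwise_cons.mp hpwF).1 y (by assumption)
          omega
      show f0 = ansF h ((p : Int) + 1)
      apply le_antisymm
      · obtain ⟨i, hi, hhvi, hsp⟩ := W_achieved h f0 (by omega)
        rw [← hhvi]
        exact le_ansF h _ i hi (by omega)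
      · rcases ansF_cases h ((p : Int) + 1) with he | ⟨i, hi, hsp, he⟩
        · rw [he]
          exact hFmax _ hmnF
        · rw [he]
          have hvi_dvs : hv h i ∈ dvs := (hmem (hv h i)).mpr ⟨i, hi, rfl⟩
          have hWvi : (p : Int) < W h (hv h i) := by
            have := span_le_W h i hi
            omega
          exact hFmax _ (by rw [List.mem_filter]; exact ⟨hvi_dvs, by simpa using hWvi⟩)


-- the dict built by A's third loop
def dicM (h : List Int) : PySem.Dict Int Int :=
  (List.range h.length).foldl
    (fun d i => d.insert (hv h i) (max (d.getD (hv h i) 0) (spanF h i))) PySem.Dict.empty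

theorem dicM_getD (h : List Int) (v : Int) : (dicM h).getD v 0 = W h v := by
  unfold dicM W
  rw [dic_getD_gen, PySem.Dict.getD_empty]

theorem dicM_keys (h : List Int) :
    (dicM h).keys = PySem.Set.ofList ((List.range h.length).map (hv h)) := by
  unfold dicM
  rw [PySem.Dict.keys_foldl_insert_key]
  rfl

theorem dicM_nodup (h : List Int) : (dicM h).keys.Nodup :=
  PySem.Dict.nodup_keys_foldl_insert_key _ _ _ _ PySem.Dict.nodup_keys_empty

theorem items_eq_keys_map (d : PySem.Dict Int Int) (hnd : d.keys.Nodup) :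
    d.items = d.keys.map (fun v => (v, d.getD v 0)) := by
  show d.items = (d.items.map Prod.fst).map _
  rw [List.map_map]
  conv_lhs => rw [← List.map_id d.items]
  apply List.map_congr_left
  intro p hp
  obtain ⟨a, b⟩ := p
  have := PySem.Dict.getD_of_mem_items d hp hnd 0
  simp only [id, Function.comp]
  rw [this]

-- the sorted distinct values, descending
def dvsL (h : List Int) : List Int := PySem.List.sorted (dicM h).keys (fun v => v) true

theorem dvsL_mem (h : List Int) (v : Int) :
    v ∈ dvsL h ↔ ∃ i, i < h.length ∧ hv h i = v := by
  unfold dvsL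
  rw [PySem.List.mem_sorted, dicM_keys, PySem.Set.mem_ofList, List.mem_map]
  constructor
  · rintro ⟨i, hi, he⟩
    exact ⟨i, List.mem_range.mp hi, he⟩
  · rintro ⟨i, hi, he⟩
    exact ⟨i, List.mem_range.mpr hi, he⟩

theorem dvsL_pairwise (h : List Int) : (dvsL h).Pairwise (fun a b => b < a) := by
  have h1 : (dvsL h).Pairwise (fun a b => b ≤ a) :=
    PySem.List.sorted_pairwise_rev (dicM h).keys (fun v => v)
  have h2 : (dvsL h).Nodup :=
    (PySem.List.sorted_perm (dicM h).keys (fun v => v) true).symm.nodup (dicM_nodup h)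
  exact (h1.and h2).imp (fun hab => lt_of_le_of_ne hab.1 (fun he => hab.2 he.symm))

theorem sorted_items_eq (h : List Int) :
    PySem.List.sorted (dicM h).items (fun x => x.1) true =
      (dvsL h).map (fun v => (v, (dicM h).getD v 0)) := by
  apply PySem.List.sorted_rev_eq_of_perm_of_pairwise_gt
  · rw [items_eq_keys_map (dicM h) (dicM_nodup h)]
    exact ((PySem.List.sorted_perm (dicM h).keys (fun v => v) true).map _)
  · rw [List.pairwise_map]
    exact dvsL_pairwise h


-- ===== bridging the Int-indexed port to the Nat-indexed model (under Pre_) =====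
theorem hv_bridge (heights : List Int) (n : Int) (hlen : n ≤ heights.length)
    (x : Nat) (hx : x < n.toNat) :
    PySem.List.pyGetD heights (x : Int) 0 = hv (heights.take n.toNat) x := by
  rw [PySem.List.pyGetD_natCast]
  unfold hv
  have hxl : x < heights.length := by omega
  have hxt : x < (heights.take n.toNat).length := by
    rw [List.length_take]; omega
  rw [List.getD_eq_getElem heights 0 hxl, List.getD_eq_getElem _ 0 hxt]
  rw [List.getElem_take]

theorem msgPop_cons (heights : List Int) (x : Int) (arr : List Int) (j : Int) (rest : List Int) :
    msgPop heights x arr (j :: rest) =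
      if PySem.List.pyGetD heights x 0 < PySem.List.pyGetD heights j 0 then
        msgPop heights x (PySem.List.pySetD arr j x) rest
      else (arr, j :: rest) := rfl

theorem popM_stack_sub (h : List Int) (x : Nat) :
    ∀ (st : List Nat) (arr : List Int) (j : Nat), j ∈ (popM h x arr st).2 → j ∈ st := by
  intro st
  induction st with
  | nil => intro arr j hj; simp [popM] at hj
  | cons a t ih =>
      intro arr j hj
      rw [popM_cons] at hj
      by_cases hc : hv h x < hv h a
      · rw [if_pos hc] at hj
        exact List.mem_cons_of_mem a (ih _ j hj)
      · rw [if_neg hc] at hj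
        exact hj

theorem msgPop_model (heights : List Int) (n : Int) (hlen : n ≤ heights.length)
    (x : Nat) (hx : x < n.toNat) :
    ∀ (st : List Nat) (arr : List Int), (∀ j ∈ st, j < n.toNat) →
    msgPop heights (x : Int) arr (st.map (fun j : Nat => (j : Int))) =
      ((popM (heights.take n.toNat) x arr st).1, (popM (heights.take n.toNat) x arr st).2.map (fun j : Nat => (j : Int))) := by
  intro st
  induction st with
  | nil => intro arr _; rfl
  | cons j t ih =>
      intro arr hb
      have hj : j < n.toNat := hb j (by simp)
      rw [List.map_cons, msgPop_cons, popM_cons]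
      rw [hv_bridge heights n hlen x hx, hv_bridge heights n hlen j hj]
      by_cases hc : hv (heights.take n.toNat) x < hv (heights.take n.toNat) j
      · rw [if_pos hc, if_pos hc]
        rw [PySem.List.pySetD_natCast]
        exact ih _ (fun q hq => hb q (by simp [hq]))
      · rw [if_neg hc, if_neg hc]
        rfl


theorem loop1_transfer (heights : List Int) (n : Int) (hlen : n ≤ heights.length) :
    ∀ (ks : List Nat), (∀ k ∈ ks, k < n.toNat) →
    ∀ (sN : List Int × List Nat), (∀ j ∈ sN.2, j < n.toNat) →
    (ks.map (fun k : Nat => (k : Int))).foldl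
        (fun (s : List Int × List Int) i =>
          ((msgPop heights i s.1 s.2).1, i :: (msgPop heights i s.1 s.2).2))
        (sN.1, sN.2.map (fun j : Nat => (j : Int))) =
      ((ks.foldl (step1 (heights.take n.toNat)) sN).1,
       (ks.foldl (step1 (heights.take n.toNat)) sN).2.map (fun j : Nat => (j : Int))) := by
  intro ks
  induction ks with
  | nil => intro _ sN _; rfl
  | cons k t ih =>
      intro hks sN hbnd
      have hk : k < n.toNat := hks k (by simp)
      simp only [List.map_cons, List.foldl_cons]
      rw [msgPop_model heights n hlen k hk sN.2 sN.1 hbnd]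
      have hstep : ((popM (heights.take n.toNat) k sN.1 sN.2).1,
          (k : Int) :: (popM (heights.take n.toNat) k sN.1 sN.2).2.map (fun j : Nat => (j : Int))) =
          ((step1 (heights.take n.toNat) sN k).1, (step1 (heights.take n.toNat) sN k).2.map (fun j : Nat => (j : Int))) := rfl
      rw [hstep]
      exact ih (fun q hq => hks q (by simp [hq])) (step1 (heights.take n.toNat) sN k)
        (by intro j hj
            rcases hj with _ | hj
            · exact hk
            · exact hbnd j (popM_stack_sub (heights.take n.toNat) k sN.2 sN.1 j (by assumption)))

theorem loop2_transfer (heights : List Int) (n : Int) (hlen : n ≤ heights.length) :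
    ∀ (ks : List Nat), (∀ k ∈ ks, 1 ≤ k ∧ k ≤ n.toNat - 1) → 1 ≤ n.toNat →
    ∀ (sN : List Int × List Nat), (∀ j ∈ sN.2, j < n.toNat) →
    (ks.map (fun k : Nat => (k : Int))).foldl
        (fun (s : List Int × List Int) i =>
          ((msgPop heights (n - i - 1) s.1 s.2).1, (n - i - 1) :: (msgPop heights (n - i - 1) s.1 s.2).2))
        (sN.1, sN.2.map (fun j : Nat => (j : Int))) =
      (((ks.map (fun k => n.toNat - 1 - k)).foldl (step1 (heights.take n.toNat)) sN).1,
       ((ks.map (fun k => n.toNat - 1 - k)).foldl (step1 (heights.take n.toNat)) sN).2.map (fun j : Nat => (j : Int))) := by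
  intro ks
  induction ks with
  | nil => intro _ _ sN _; rfl
  | cons k t ih =>
      intro hks hm sN hbnd
      have hk := hks k (by simp)
      have hx : n.toNat - 1 - k < n.toNat := by omega
      simp only [List.map_cons, List.foldl_cons]
      have hidx : n - (k : Int) - 1 = ((n.toNat - 1 - k : Nat) : Int) := by omega
      rw [hidx]
      rw [msgPop_model heights n hlen (n.toNat - 1 - k) hx sN.2 sN.1 hbnd]
      have hstep : ((popM (heights.take n.toNat) (n.toNat - 1 - k) sN.1 sN.2).1,
          ((n.toNat - 1 - k : Nat) : Int) :: (popM (heights.take n.toNat) (n.toNat - 1 - k) sN.1 sN.2).2.map (fun j : Nat => (j : Int))) =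
          ((step1 (heights.take n.toNat) sN (n.toNat - 1 - k)).1,
           (step1 (heights.take n.toNat) sN (n.toNat - 1 - k)).2.map (fun j : Nat => (j : Int))) := rfl
      rw [hstep]
      exact ih (fun q hq => hks q (by simp [hq])) hm (step1 (heights.take n.toNat) sN (n.toNat - 1 - k))
        (by intro j hj
            rcases hj with _ | hj
            · exact hx
            · exact hbnd j (popM_stack_sub (heights.take n.toNat) (n.toNat - 1 - k) sN.2 sN.1 j (by assumption)))


theorem alt_eq_refOut (n : Int) (heights : List Int) :
    max_strength_groups_alt n heights = refOut (heights.take n.toNat) := by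
  by_cases hn0 : n ≤ 0
  · unfold max_strength_groups_alt
    rw [if_pos hn0]
    have h1 : n.toNat = 0 := by omega
    rw [h1]
    rfl
  · exact alt_eq_refOut_pos n heights (by omega)

theorem dict_fold_eq (heights : List Int) (n : Int) (hn : 0 ≤ n) (hlen : n ≤ heights.length)
    (NSE PSE : List Int)
    (hN : ∀ i, i < n.toNat → NSE.getD i 0 = (nseF (heights.take n.toNat) i : Int))
    (hP : ∀ i, i < n.toNat → PSE.getD i 0 = pseF (heights.take n.toNat) i) :
    (List.range n.toNat).foldl
      (fun (d : PySem.Dict Int Int) (i : Nat) =>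
        d.insert (PySem.List.pyGetD heights (i : Int) 0)
          (max (d.getD (PySem.List.pyGetD heights (i : Int) 0) 0)
            (PySem.List.pyGetD NSE (i : Int) 0 - PySem.List.pyGetD PSE (i : Int) 0 - 1)))
      PySem.Dict.empty = dicM (heights.take n.toNat) := by
  unfold dicM
  rw [List.length_take, min_eq_left (by omega)]
  apply PySem.List.foldl_congr_mem
  intro d i hi
  rw [List.mem_range] at hi
  rw [hv_bridge heights n hlen i hi]
  rw [PySem.List.pyGetD_natCast, PySem.List.pyGetD_natCast]
  rw [hN i hi, hP i hi]
  rfl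

theorem A_eq_refOut_pos (n : Int) (heights : List Int) (hn : 0 ≤ n) (hlen : n ≤ heights.length) :
    max_strength_groups n heights = refOut (heights.take n.toNat) := by
  by_cases hm0 : n.toNat = 0
  · have hn0 : n = 0 := by omega
    subst hn0
    rfl
  · have hm1 : 1 ≤ n.toNat := by omega
    have hml : (heights.take n.toNat).length = n.toNat := by
      rw [List.length_take]; omega
    unfold max_strength_groups
    dsimp only
    have hrange : PySem.List.pyRange 1 n 1 =
        ((List.range (n.toNat - 1)).map (fun k => k + 1)).map (fun k : Nat => (k : Int)) := by
      rw [PySem.List.pyRange_one]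
      have h1 : (n - 1).toNat = n.toNat - 1 := by omega
      rw [h1, List.map_map]
      apply List.map_congr_left
      intro k _
      simp only [Function.comp]
      push_cast
      ring
    have hrange0 : PySem.List.pyRange 0 n 1 =
        (List.range n.toNat).map (fun k : Nat => (k : Int)) := by
      rw [PySem.List.pyRange_one]
      have h1 : (n - 0).toNat = n.toNat := by omega
      rw [h1]
      apply List.map_congr_left
      intro k _
      simp
    have hrepn : PySem.List.pyRepeat [n] n = List.replicate n.toNat ((n.toNat : Nat) : Int) := by
      rw [PySem.List.pyRepeat_singleton]
      congr 1
      omega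
    have hrep1 : PySem.List.pyRepeat [(-1 : Int)] n = List.replicate n.toNat (-1 : Int) := by
      rw [PySem.List.pyRepeat_singleton]
    have hrep0 : PySem.List.pyRepeat [(0 : Int)] n = List.replicate n.toNat (0 : Int) := by
      rw [PySem.List.pyRepeat_singleton]
    rw [hrange, hrange0, hrepn, hrep1, hrep0]
    have hzero : [(0 : Int)] = ([0] : List Nat).map (fun j : Nat => (j : Int)) := rfl
    rw [hzero]
    have hstack2 : [n - 1] = ([n.toNat - 1] : List Nat).map (fun j : Nat => (j : Int)) := by
      simp only [List.map_cons, List.map_nil]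
      congr 1
      omega
    rw [hstack2]
    rw [loop1_transfer heights n hlen _
      (by intro k hk
          simp only [List.mem_map, List.mem_range] at hk
          obtain ⟨q, hq, rfl⟩ := hk
          omega)
      (List.replicate n.toNat ((n.toNat : Nat) : Int), [0])
      (by intro j hj
          simp only [List.mem_singleton] at hj
          omega)]
    rw [loop2_transfer heights n hlen _
      (by intro k hk
          simp only [List.mem_map, List.mem_range] at hk
          obtain ⟨q, hq, rfl⟩ := hk
          omega)
      hm1
      (List.replicate n.toNat (-1 : Int), [n.toNat - 1])
      (by intro j hj
          simp only [List.mem_singleton] at hj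
          omega)]
    dsimp only
    have hks2 : ((List.range (n.toNat - 1)).map (fun k => k + 1)).map (fun k => n.toNat - 1 - k) =
        (List.range (n.toNat - 1)).map (fun k => n.toNat - 2 - k) := by
      rw [List.map_map]
      apply List.map_congr_left
      intro k _
      simp only [Function.comp]
      omega
    have hks1 : (List.range (n.toNat - 1)).map (fun k => k + 1) = List.range' 1 (n.toNat - 1) := by
      rw [List.range'_eq_map_range]
      apply List.map_congr_left
      intro k _
      omega
    rw [hks2, hks1]
    obtain ⟨hnlen, hnent⟩ := nse_final (heights.take n.toNat) (by omega)
    obtain ⟨hplen, hpent⟩ := pse_final (heights.take n.toNat) (by omega)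
    rw [hml] at hnlen hnent hplen hpent
    rw [List.foldl_map (f := fun k : Nat => (k : Int))]
    rw [dict_fold_eq heights n hn hlen _ _
      (fun i hi => hnent i (by omega)) (fun i hi => hpent i (by omega))]
    rw [sorted_items_eq]
    rw [List.foldl_map (f := fun v => (v, (dicM (heights.take n.toNat)).getD v 0))]
    simp only [dicM_getD]
    have hfill := fill_inv_loop (heights.take n.toNat) (dvsL (heights.take n.toNat)) []
      (List.replicate (heights.take n.toNat).length (0 : Int), 0)
      (fill_inv_init (heights.take n.toNat))
    rw [List.nil_append, hml] at hfill
    obtain ⟨hfc, hflen2, hfent2, _⟩ := hfill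
    apply List.ext_getElem
    · rw [hflen2]
      simp [refOut, hml]
    · intro p hp1 hp2
      have hpm : p < (heights.take n.toNat).length := by rw [hflen2] at hp1; omega
      rw [← List.getD_eq_getElem _ 0 hp1]
      rw [hfent2 p hpm]
      rw [headD_filter_eq_ansF (heights.take n.toNat)
        (by intro habs; rw [habs] at hml; simp at hml; omega)
        (dvsL (heights.take n.toNat)) (dvsL_mem _) (dvsL_pairwise _) p hpm]
      simp only [refOut]
      rw [List.getElem_map, List.getElem_range]
-- ===== VERDICT (by name: the statement is the Claim_ definition above) =====
theorem A_eq_refOut (n : Int) (heights : List Int) (hlen : n ≤ heights.length) :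
    max_strength_groups n heights = refOut (heights.take n.toNat) := by
  by_cases hn0 : n ≤ 0
  · have h1 : n.toNat = 0 := by omega
    unfold max_strength_groups
    dsimp only
    rw [PySem.List.pyRange_one_eq_nil (show n ≤ (1 : Int) by omega)]
    rw [PySem.List.pyRange_one_eq_nil (show n ≤ (0 : Int) by omega)]
    simp only [List.foldl_nil]
    rw [PySem.List.pyRepeat_singleton, h1]
    rfl
  · exact A_eq_refOut_pos n heights (by omega) hlen

theorem max_strength_groups_spec : Claim_equal_max_strength_groups := by
  intro n heights _ hpre
  show max_strength_groups n heights = max_strength_groups_alt n heights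
  rw [A_eq_refOut n heights hpre, alt_eq_refOut n heights]
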